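-- pv_equiv track=rewrite | github.com/nicolaswee/jump | jump2.py | solution
-- ===== SOURCE A (Python) =====
-- def solution(prices, buyIndicator, sellIndicator):
--     # prices is a list of prices.
--     # buyIndicator is a list of arbitrary length, 1s and -1, indicating moves up and down.
--     # sellIndicator is of the same format as buyIndicator.
--     position = [0]*len(prices)
--     currIndicator = [0]
--     for i in range(1, len(prices)):
--         if prices[i-1] < prices[i]:
--             currIndicator.append(1)
--         elif prices[i-1] > prices[i]:
--             currIndicator.append(-1)
--         else:
--             currIndicator.append(0)
--
--         position[i] = position[i-1]
--
--         if len(currIndicator) >= len(buyIndicator) and currIndicator[-1] != 0: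
--             left = len(buyIndicator)-1
--             for x in range(len(currIndicator)-1,-1,-1):
--                 if currIndicator[x] == buyIndicator[left]:
--                     left -= 1
--                 elif currIndicator[x] != 0:
--                     break
--                 if left == -1:
--                     position[i] += 1
--                     break
--
--         if len(currIndicator) >= len(sellIndicator) and currIndicator[-1] != 0:
--             left = len(sellIndicator)-1
--             for x in range(len(currIndicator)-1,-1,-1):
--                 if currIndicator[x] == sellIndicator[left]:
--                     left -= 1
--                 elif currIndicator[x] != 0:
--                     break
--                 if left == -1:
--                     position[i] -= 1
--                     break
--
--     return position
-- ===== SOURCE B (Python) =====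
-- # B: one pass maintaining a run-length-encoded move history and a running count,
-- # instead of rebuilding and re-scanning the full indicator list at every index.
-- def _match(hist, rpat):
--     # hist: run-length encoded indicator history, oldest run first
--     # rpat: the pattern reversed; greedy backward match, zeros skippable
--     m = len(rpat)
--     j = 0
--     for k in range(len(hist) - 1, -1, -1):
--         v, c = hist[k]
--         while c and j < m and rpat[j] == v:
--             j += 1
--             c -= 1
--         if j == m:
--             return True
--         if c and v != 0:
--             return False
--     return False
--
-- def solution(prices, buyIndicator, sellIndicator):
--     if not prices:
--         return []
--     rbuy = buyIndicator[::-1]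
--     rsell = sellIndicator[::-1]
--     hist = [(0, 1)]
--     cur = 0
--     position = [0]
--     for i in range(1, len(prices)):
--         move = (prices[i - 1] < prices[i]) - (prices[i - 1] > prices[i])
--         if hist[-1][0] == move:
--             hist[-1] = (move, hist[-1][1] + 1)
--         else:
--             hist.append((move, 1))
--         if move != 0:
--             if _match(hist, rbuy):
--                 cur += 1
--             if _match(hist, rsell):
--                 cur -= 1
--         position.append(cur)
--     return position
-- ===== Notes on version B (the rewrite author's own statement) =====
-- stated objective: alternative
-- what changed: B makes one pass keeping a run-length-encoded move history and a running position counter, matching each pattern greedily over at most |pattern|+1 runs, instead of A's rebuilding of the full indicator list and backward rescan over it (including whole zero runs) at every index.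
import Mathlib
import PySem

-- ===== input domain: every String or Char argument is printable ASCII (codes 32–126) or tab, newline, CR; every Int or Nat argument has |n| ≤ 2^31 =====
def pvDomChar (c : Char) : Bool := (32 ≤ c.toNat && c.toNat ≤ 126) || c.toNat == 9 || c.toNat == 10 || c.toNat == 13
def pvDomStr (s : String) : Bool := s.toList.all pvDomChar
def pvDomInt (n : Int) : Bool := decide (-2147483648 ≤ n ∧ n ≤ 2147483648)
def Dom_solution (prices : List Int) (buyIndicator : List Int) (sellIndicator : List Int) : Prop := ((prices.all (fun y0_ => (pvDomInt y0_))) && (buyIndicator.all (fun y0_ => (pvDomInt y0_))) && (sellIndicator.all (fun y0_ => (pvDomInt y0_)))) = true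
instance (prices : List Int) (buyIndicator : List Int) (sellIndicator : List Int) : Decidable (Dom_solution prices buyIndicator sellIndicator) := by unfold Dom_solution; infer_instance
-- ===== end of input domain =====

-- B replaces A's per-index backward rescan of the full indicator list by a single pass
-- maintaining a run-length-encoded move history and a running counter (objective: alternative algorithm).

-- ===== PORT A =====
-- A's inner `for x in range(len(currIndicator)-1,-1,-1)` loop: recursion over the
-- reversed indicator list, `left` carried as the remaining suffix of the reversed pattern
-- (pat[left] = head of that suffix; `left == -1` = suffix empty).
def pvAScan (rci : List Int) (rp : List Int) : Bool :=
  match rci, rp with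
  | [], _ => false                       -- loop exhausted without left == -1
  | _ :: _, [] => false                  -- pattern empty: Python raises IndexError here (outside Pre_)
  | e :: es, p :: rp' =>
    if e = p then
      (if rp' = [] then true else pvAScan es rp')   -- left -= 1; if left == -1: found
    else if e ≠ 0 then false             -- break
    else pvAScan es (p :: rp')           -- skip (trailing `if left == -1` cannot fire: left ≥ 0 here)

def pvAStep (prices buy sell : List Int) (st : List Int × List Int) (i : Int) : List Int × List Int :=
  let ci := st.1
  let a := PySem.List.pyGetD prices (i - 1) 0
  let b := PySem.List.pyGetD prices i 0
  let ci := ci ++ [if a < b then (1 : Int) else if a > b then -1 else 0]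
  let position := st.2.set i.toNat (PySem.List.pyGetD st.2 (i - 1) 0)
  let position :=
    if buy.length ≤ ci.length ∧ PySem.List.pyGetD ci (-1) 0 ≠ 0 then
      (if pvAScan ci.reverse buy.reverse then
        position.set i.toNat (PySem.List.pyGetD position i 0 + 1)
      else position)
    else position
  let position :=
    if sell.length ≤ ci.length ∧ PySem.List.pyGetD ci (-1) 0 ≠ 0 then
      (if pvAScan ci.reverse sell.reverse then
        position.set i.toNat (PySem.List.pyGetD position i 0 - 1)
      else position)
    else position
  (ci, position)

def solution (prices : List Int) (buyIndicator : List Int) (sellIndicator : List Int) : List Int :=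
  ((PySem.List.pyRange 1 prices.length 1).foldl (pvAStep prices buyIndicator sellIndicator)
    ([0], List.replicate prices.length 0)).2

-- ===== PORT B =====
-- Source B's `while c and j < m and rpat[j] == v` loop (j carried as the remaining rpat suffix)
def pvConsume (v : Int) (c : Int) (rp : List Int) : Int × List Int :=
  match rp with
  | [] => (c, [])
  | p :: rp' => if c ≠ 0 ∧ p = v then pvConsume v (c - 1) rp' else (c, p :: rp')

-- Source B's _match, iterating hist from its last run backwards (argument = hist.reverse)
def pvBMatch (histR : List (Int × Int)) (rp : List Int) : Bool :=
  match histR with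
  | [] => false
  | (v, c) :: hs =>
    let r := pvConsume v c rp
    if r.2 = [] then true                 -- j == m
    else if r.1 ≠ 0 ∧ v ≠ 0 then false    -- if c and v != 0
    else pvBMatch hs r.2

-- Source B's run-length push: `if hist[-1][0] == move: hist[-1] = (move, hist[-1][1]+1) else: hist.append((move,1))`
def pvPush (hist : List (Int × Int)) (move : Int) : List (Int × Int) :=
  match hist.getLast? with
  | some (v, c) => if v = move then hist.dropLast ++ [(move, c + 1)] else hist ++ [(move, 1)]
  | none => hist ++ [(move, 1)]          -- unreachable: hist starts nonempty and only grows

def pvBStep (prices rbuy rsell : List Int) (st : List (Int × Int) × Int × List Int) (i : Int) :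
    List (Int × Int) × Int × List Int :=
  let hist := st.1
  let cur := st.2.1
  let a := PySem.List.pyGetD prices (i - 1) 0
  let b := PySem.List.pyGetD prices i 0
  let move : Int := (if a < b then 1 else 0) - (if a > b then 1 else 0)
  let hist := pvPush hist move
  let cur :=
    if move ≠ 0 then
      (let cur := if pvBMatch hist.reverse rbuy then cur + 1 else cur
       if pvBMatch hist.reverse rsell then cur - 1 else cur)
    else cur
  (hist, cur, st.2.2 ++ [cur])

def solution_alt (prices : List Int) (buyIndicator : List Int) (sellIndicator : List Int) : List Int :=
  match prices with
  | [] => []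
  | _ :: _ =>
    ((PySem.List.pyRange 1 prices.length 1).foldl
      (pvBStep prices buyIndicator.reverse sellIndicator.reverse)
      ([(0, 1)], 0, [0])).2.2

-- ===== PRECONDITION & SPEC =====
-- Pre_ excludes exactly the inputs on which A raises IndexError: an empty pattern list is
-- indexed (buyIndicator[-1]/sellIndicator[-1]) as soon as some two consecutive prices differ.
def Pre_solution (prices : List Int) (buyIndicator : List Int) (sellIndicator : List Int) : Prop :=
  (buyIndicator = [] ∨ sellIndicator = []) → List.IsChain Eq prices
instance (prices : List Int) (buyIndicator : List Int) (sellIndicator : List Int) : Decidable (Pre_solution prices buyIndicator sellIndicator) := by unfold Pre_solution; infer_instance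
def pvWitness_solution : List Int × List Int × List Int := ([3, 1, 2, 2, 4], [1, 1], [-1])

def Spec_solution (prices : List Int) (buyIndicator : List Int) (sellIndicator : List Int) (out : List Int) : Prop := out = solution_alt prices buyIndicator sellIndicator
instance (prices : List Int) (buyIndicator : List Int) (sellIndicator : List Int) (out : List Int) : Decidable (Spec_solution prices buyIndicator sellIndicator out) := by unfold Spec_solution; infer_instance

-- ===== CLAIM (what is proved, stated in full; the proofs are below) =====
def Claim_equal_solution : Prop := ∀ (prices : List Int) (buyIndicator : List Int) (sellIndicator : List Int), Dom_solution prices buyIndicator sellIndicator → Pre_solution prices buyIndicator sellIndicator → Spec_solution prices buyIndicator sellIndicator (solution prices buyIndicator sellIndicator)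

-- ===== LEMMAS AND PROOFS =====

-- expansion of a run-length-encoded list back to the element list
def pvExpand : List (Int × Int) → List Int
  | [] => []
  | (v, c) :: t => List.replicate c.toNat v ++ pvExpand t

-- A's backward scan skips a run of zeros when the pending pattern element is nonzero
theorem pvAScan_replicate_zero (c : Nat) (rest : List Int) (p : Int) (rp' : List Int)
    (hp : p ≠ 0) :
    pvAScan (List.replicate c 0 ++ rest) (p :: rp') = pvAScan rest (p :: rp') := by
  induction c with
  | zero => simp
  | succ c ih =>
    simp only [List.replicate_succ, List.cons_append, pvAScan]
    have h0 : ¬ ((0 : Int) = p) := fun h => hp h.symm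
    simp [h0, ih]

-- A's backward scan across one run = B's pvConsume followed by B's two run-exit tests
theorem pvAScan_run (c : Nat) (v : Int) (rest rp : List Int) (h : rp ≠ []) :
    pvAScan (List.replicate c v ++ rest) rp =
      (if (pvConsume v (c : Int) rp).2 = [] then true
       else if (pvConsume v (c : Int) rp).1 ≠ 0 ∧ v ≠ 0 then false
       else pvAScan rest (pvConsume v (c : Int) rp).2) := by
  induction c generalizing rp with
  | zero =>
    obtain ⟨p, rp', rfl⟩ := List.exists_cons_of_ne_nil h
    simp [pvConsume]
  | succ c ih =>
    obtain ⟨p, rp', rfl⟩ := List.exists_cons_of_ne_nil h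
    simp only [List.replicate_succ, List.cons_append, pvAScan, pvConsume]
    push_cast
    by_cases hpv : p = v
    · rw [if_pos hpv.symm, if_pos (show ((c : Int) + 1 ≠ 0 ∧ p = v) from ⟨by omega, hpv⟩),
        show (c : Int) + 1 - 1 = (c : Int) by ring]
      cases rp' with
      | nil => simp [pvConsume]
      | cons p2 rp2 =>
        rw [if_neg (show ¬(p2 :: rp2 = []) by simp)]
        exact ih (p2 :: rp2) (by simp)
    · rw [if_neg (show ¬(v = p) from fun hh => hpv hh.symm),
        if_neg (show ¬((c : Int) + 1 ≠ 0 ∧ p = v) from fun hh => hpv hh.2)]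
      by_cases hv : v = 0
      · subst hv
        rw [if_neg (show ¬((0 : Int) ≠ 0) by simp),
          if_neg (show ¬((((c : Int) + 1, p :: rp').2) = []) by simp),
          if_neg (show ¬(((c : Int) + 1, p :: rp').1 ≠ 0 ∧ (0 : Int) ≠ 0) by simp)]
        exact pvAScan_replicate_zero c rest p rp' hpv
      · rw [if_pos (show (v ≠ 0) from hv),
          if_neg (show ¬((((c : Int) + 1, p :: rp').2) = []) by simp),
          if_pos (show (((c : Int) + 1, p :: rp').1 ≠ 0 ∧ v ≠ 0) from ⟨by omega, hv⟩)]

-- B's _match over the (reversed) run-length encoding = A's backward scan over the elements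
theorem pvBMatch_eq_pvAScan (hs : List (Int × Int)) (rp : List Int)
    (hc : ∀ p ∈ hs, 1 ≤ p.2) (h : rp ≠ []) :
    pvBMatch hs rp = pvAScan (pvExpand hs) rp := by
  induction hs generalizing rp with
  | nil =>
    obtain ⟨p, rp', rfl⟩ := List.exists_cons_of_ne_nil h
    simp [pvBMatch, pvExpand, pvAScan]
  | cons vc hs ih =>
    obtain ⟨v, c⟩ := vc
    have hc1 : 1 ≤ c := hc (v, c) (by simp)
    have hcast : ((c.toNat : Nat) : Int) = c := Int.toNat_of_nonneg (by omega)
    rw [pvExpand, pvAScan_run c.toNat v (pvExpand hs) rp h, hcast]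
    simp only [pvBMatch]
    rcases hr : pvConsume v c rp with ⟨c', rp'⟩
    split_ifs with h1 h2
    · rfl
    · rfl
    · exact ih _ (fun p hp => hc p (List.mem_cons_of_mem _ hp)) h1

-- a pattern longer than the scanned list can never complete
theorem pvAScan_short (rci rp : List Int) (h : rci.length < rp.length) :
    pvAScan rci rp = false := by
  induction rci generalizing rp with
  | nil => cases rp <;> simp [pvAScan]
  | cons e es ih =>
    cases rp with
    | nil => simp at h
    | cons p rp' =>
      have h' : es.length < rp'.length := by simpa using h
      have hne : rp' ≠ [] := by intro hh; rw [hh] at h'; simp at h'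
      simp only [pvAScan]
      split_ifs with h1 h2
      all_goals first
        | rfl
        | (exact absurd h2 hne)
        | (exact ih rp' h')
        | (exact ih (p :: rp') (by simp; omega))

-- pushing one move onto the run-length encoding prepends it to the reversed expansion
theorem pvPush_expand (hist : List (Int × Int)) (move : Int)
    (hne : hist ≠ []) (hc : ∀ p ∈ hist, 1 ≤ p.2) :
    pvExpand (pvPush hist move).reverse = move :: pvExpand hist.reverse ∧
      pvPush hist move ≠ [] ∧ ∀ p ∈ pvPush hist move, 1 ≤ p.2 := by
  rcases (List.eq_nil_or_concat hist) with rfl | ⟨init, ⟨v, c⟩, rfl⟩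
  · exact absurd rfl hne
  · simp only [List.concat_eq_append] at hne hc ⊢
    have hc1 : 1 ≤ c := hc (v, c) (by simp)
    unfold pvPush
    rw [List.getLast?_concat]
    dsimp only
    by_cases hvm : v = move
    · subst hvm
      rw [if_pos rfl, List.dropLast_concat]
      refine ⟨?_, by simp, ?_⟩
      · simp [pvExpand, show (c + 1).toNat = c.toNat + 1 by omega, List.replicate_succ]
      · intro p hp
        rcases List.mem_append.mp hp with hp | hp
        · exact hc p (List.mem_append_left _ hp)
        · simp only [List.mem_singleton] at hp
          rw [hp]
          exact (by omega : (1 : Int) ≤ c + 1)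
    · rw [if_neg hvm]
      refine ⟨?_, by simp, ?_⟩
      · simp [pvExpand]
      · intro p hp
        rcases List.mem_append.mp hp with hp | hp
        · exact hc p hp
        · simp only [List.mem_singleton] at hp
          rw [hp]

-- element read / write at the join point of an append
theorem pvGetD_append_len (xs ys : List Int) (y d : Int) :
    (xs ++ y :: ys).getD xs.length d = y := by
  induction xs with
  | nil => rfl
  | cons x xs ih => exact ih

theorem pvSet_append_len (xs ys : List Int) (y v : Int) :
    (xs ++ y :: ys).set xs.length v = xs ++ v :: ys := by
  induction xs with
  | nil => rfl
  | cons x xs ih => simp [ih]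

-- a strict move at index k contradicts a constant price list
theorem pvNotChain (prices : List Int) (k : Nat) (h1 : 1 ≤ k) (hk : k < prices.length)
    (hne : PySem.List.pyGetD prices ((k : Int) - 1) 0 ≠ PySem.List.pyGetD prices (k : Int) 0) :
    ¬ List.IsChain Eq prices := by
  intro hch
  have hcast : ((k : Int) - 1) = ((k - 1 : Nat) : Int) := by omega
  rw [hcast, PySem.List.pyGetD_natCast, PySem.List.pyGetD_natCast] at hne
  have h2 : k - 1 + 1 < prices.length := by omega
  have := (List.isChain_iff_getElem.mp hch) (k - 1) h2
  apply hne
  rw [List.getD_eq_getElem prices 0 (by omega), List.getD_eq_getElem prices 0 hk]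
  rw [this]
  congr 1
  omega

-- one pattern-side update of A's position cell = adding B's 0/±1 contribution
theorem pvSide (q' rep : List Int) (cur : Int) (pat ci' : List Int) (d : Int)
    (c0 : Prop) [Decidable c0] (hc0 : c0) (n : Nat) (hn : n = q'.length)
    (hlen : ci'.length = n + 1) :
    (if pat.length ≤ ci'.length ∧ c0 then
       (if pvAScan ci'.reverse pat.reverse = true then
          (q' ++ cur :: rep).set ((n : Int)).toNat
            (PySem.List.pyGetD (q' ++ cur :: rep) (n : Int) 0 + d)
        else q' ++ cur :: rep)
     else q' ++ cur :: rep)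
    = q' ++ (if pvAScan ci'.reverse pat.reverse = true then cur + d else cur) :: rep := by
  subst hn
  by_cases hbl : pat.length ≤ ci'.length
  · rw [if_pos ⟨hbl, hc0⟩, Int.toNat_natCast, PySem.List.pyGetD_natCast, List.getD_eq_getElem?_getD]
    rw [show (q' ++ cur :: rep)[q'.length]?.getD 0 = (q' ++ cur :: rep).getD q'.length 0 from rfl]
    rw [pvGetD_append_len, pvSet_append_len]
    split_ifs <;> rfl
  · rw [if_neg (fun hh => hbl hh.1)]
    have hs : pvAScan ci'.reverse pat.reverse = false :=
      pvAScan_short _ _ (by simp only [List.length_reverse]; omega)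
    rw [hs]
    simp

-- the joint loop invariant: after the steps i = 1 .. k, A's and B's states correspond
theorem pvLoop_inv (prices buy sell : List Int) (hpre : Pre_solution prices buy sell)
    (k : Nat) (hk1 : 1 ≤ k) (hkn : k ≤ prices.length) :
    ∃ (ci : List Int) (hist : List (Int × Int)) (cur : Int) (q : List Int),
      (PySem.List.pyRange 1 (k : Int) 1).foldl (pvAStep prices buy sell)
          ([0], List.replicate prices.length 0) =
        (ci, q ++ cur :: List.replicate (prices.length - k) 0) ∧
      (PySem.List.pyRange 1 (k : Int) 1).foldl (pvBStep prices buy.reverse sell.reverse)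
          ([(0, 1)], 0, [0]) = (hist, cur, q ++ [cur]) ∧
      ci.reverse = pvExpand hist.reverse ∧
      ci.length = k ∧
      hist ≠ [] ∧ (∀ p ∈ hist, 1 ≤ p.2) ∧
      q.length = k - 1 := by
  induction k, hk1 using Nat.le_induction with
  | base =>
    refine ⟨[0], [(0, 1)], 0, [], ?_, ?_, by simp [pvExpand], by simp, by simp, by simp, by simp⟩
    · rw [show ((1 : Nat) : Int) = 1 from rfl, PySem.List.pyRange_one_eq_nil (le_refl 1)]
      obtain ⟨m, hm⟩ : ∃ m, prices.length = m + 1 := ⟨prices.length - 1, by omega⟩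
      simp [hm, List.replicate_succ]
    · rw [show ((1 : Nat) : Int) = 1 from rfl, PySem.List.pyRange_one_eq_nil (le_refl 1)]
      simp
  | succ k hk ih =>
    have hkn' : k ≤ prices.length := by omega
    obtain ⟨ci, hist, cur, q, ihA, ihB, hexp, hlen, hhne, hhc, hql⟩ := ih hkn'
    have hrange : PySem.List.pyRange 1 ((k + 1 : Nat) : Int) 1 =
        PySem.List.pyRange 1 (k : Int) 1 ++ [(k : Int)] := by
      rw [show ((k + 1 : Nat) : Int) = (k : Int) + 1 by push_cast; ring]
      exact PySem.List.pyRange_one_succ_right (by exact_mod_cast hk)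
    rw [hrange, List.foldl_append, List.foldl_append, ihA, ihB]
    simp only [List.foldl_cons, List.foldl_nil]
    -- shared move value
    set a := PySem.List.pyGetD prices ((k : Int) - 1) 0 with ha
    set b := PySem.List.pyGetD prices (k : Int) 0 with hb
    set mv : Int := if a < b then 1 else if a > b then -1 else 0 with hmvdef
    have hmv : ((if a < b then (1 : Int) else 0) - (if a > b then 1 else 0)) = mv := by
      rw [hmvdef]; split_ifs <;> omega
    obtain ⟨hpush, hpne, hpc⟩ := pvPush_expand hist mv hhne hhc
    have hexp' : (ci ++ [mv]).reverse = pvExpand (pvPush hist mv).reverse := by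
      rw [hpush, List.reverse_append, ← hexp]; simp
    have hlen' : (ci ++ [mv]).length = k + 1 := by simp [hlen]
    have hrep : List.replicate (prices.length - k) (0 : Int) =
        0 :: List.replicate (prices.length - (k + 1)) 0 := by
      rw [show prices.length - k = (prices.length - (k + 1)) + 1 by omega, List.replicate_succ]
    have hq'l : (q ++ [cur]).length = k := by simp; omega
    -- A's `position[i] = position[i-1]` write
    have hread : PySem.List.pyGetD (q ++ cur :: List.replicate (prices.length - k) 0)
        ((k : Int) - 1) 0 = cur := by
      rw [show ((k : Int) - 1) = ((k - 1 : Nat) : Int) by omega, PySem.List.pyGetD_natCast,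
        ← hql, pvGetD_append_len]
    have hset : (q ++ cur :: List.replicate (prices.length - k) 0).set ((k : Int)).toNat cur =
        (q ++ [cur]) ++ cur :: List.replicate (prices.length - (k + 1)) 0 := by
      rw [hrep, Int.toNat_natCast, show (q ++ cur :: 0 :: List.replicate (prices.length - (k + 1)) 0) =
        ((q ++ [cur]) ++ (0 : Int) :: List.replicate (prices.length - (k + 1)) 0) by simp,
        ← hq'l, pvSet_append_len]
    simp only [pvAStep, pvBStep, ← ha, ← hb, hmv, ← hmvdef, hread, hset,
      PySem.List.pyGetD_neg_one_append_singleton]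
    by_cases hmv0 : mv = 0
    · -- flat move: neither side checks anything
      rw [hmv0]
      refine ⟨ci ++ [(0 : Int)], pvPush hist 0, cur, q ++ [cur], ?_, ?_,
        by rw [← hmv0]; exact hexp', by rw [← hmv0]; exact hlen',
        by rw [← hmv0]; exact hpne, by rw [← hmv0]; exact hpc, by omega⟩
      · rw [if_neg (by simp), if_neg (by simp)]
      · rw [if_neg (by simp)]
    · -- strict move: Pre_ gives nonempty patterns; the two match tests agree
      have hab : a ≠ b := by
        intro h; apply hmv0; rw [hmvdef, h]; simp
      have hnch : ¬ List.IsChain Eq prices := pvNotChain prices k hk (by omega) hab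
      have hbuy : buy ≠ [] := fun h => hnch (hpre (Or.inl h))
      have hsell : sell ≠ [] := fun h => hnch (hpre (Or.inr h))
      have hmatch : ∀ pat : List Int, pat ≠ [] →
          pvBMatch (pvPush hist mv).reverse pat.reverse = pvAScan (ci ++ [mv]).reverse pat.reverse := by
        intro pat hp
        rw [pvBMatch_eq_pvAScan _ _ (fun p hp2 => hpc p (List.mem_reverse.mp hp2))
          (by simp [hp]), ← hexp']
      rw [hmatch buy hbuy, hmatch sell hsell, if_pos hmv0]
      simp only [sub_eq_add_neg]
      rw [pvSide (q ++ [cur]) _ cur buy (ci ++ [mv]) 1 _ hmv0 k hq'l.symm hlen']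
      rw [pvSide (q ++ [cur]) _ _ sell (ci ++ [mv]) (-1) _ hmv0 k hq'l.symm hlen']
      exact ⟨ci ++ [mv], pvPush hist mv, _, q ++ [cur], rfl, rfl, hexp', hlen', hpne, hpc, by omega⟩
-- ===== VERDICT (by name: the statement is the Claim_ definition above) =====
theorem solution_spec : Claim_equal_solution := by
  intro prices buy sell _ hpre
  unfold Spec_solution solution solution_alt
  cases prices with
  | nil =>
    rw [show ((List.length ([] : List Int)) : Int) = 0 from rfl,
      PySem.List.pyRange_one_eq_nil (by norm_num)]
    rfl
  | cons p0 ps =>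
    obtain ⟨ci, hist, cur, q, hA, hB, -, -, -, -, -⟩ :=
      pvLoop_inv (p0 :: ps) buy sell hpre (p0 :: ps).length (by simp) (le_refl _)
    rw [hA, hB]
    simp
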